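-- pv_equiv track=rewrite | github.com/tgc-dk/openlp-migration--test | openlp/core/projectors/sourceselectform.py | source_group
-- ===== SOURCE A (Python) =====
-- def source_group(inputs, source_text):
--     """
--     Return a dictionary where key is source[0] and values are inputs
--     grouped by source[0].
--
--     ::
--
--         source_text = dict{"key1": "key1-text",
--                            "key2": "key2-text",
--                            ...}
--         return:
--             dict{key1[0]: {"key11": "key11-text",
--                            "key12": "key12-text",
--                            "key13": "key13-text",
--                            ...}
--                  key2[0]: {"key21": "key21-text",
--                            "key22": "key22-text",
--                            ...}
--
--     :param inputs: List of inputs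
--     :param source_text: Dictionary of {code: text} values to display
--     :returns: dict
--     """
--     groupdict = {}
--     keydict = {}
--     checklist = inputs
--     key = checklist[0][0]
--     for item in checklist:
--         if item[0] == key:
--             groupdict[item] = source_text[item]
--             continue
--         else:
--             keydict[key] = groupdict
--             key = item[0]
--             groupdict = {item: source_text[item]}
--     keydict[key] = groupdict
--     return keydict
-- ===== SOURCE B (Python) =====
-- def source_group(inputs, source_text):
--     # Stage 1: split inputs into maximal runs of consecutive items sharing first char.
--     runs = []
--     for item in inputs:
--         if runs and runs[-1][0][0] == item[0]:
--             runs[-1].append(item)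
--         else:
--             runs.append([item])
--     # Stage 2: build the nested dict from the runs (later runs with the same
--     # first char overwrite earlier ones, as in the original).
--     return {run[0][0]: {item: source_text[item] for item in run} for run in runs}
-- ===== Notes on version B (the rewrite author's own statement) =====
-- stated objective: alternative
-- what changed: Replaces A's single-pass key/groupdict state machine (pending group flushed at each run boundary and again after the loop, first key precomputed via inputs[0][0]) by two staged passes: first split the input into maximal consecutive runs, then build the nested dict from the runs with a dict comprehension.
import Mathlib
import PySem

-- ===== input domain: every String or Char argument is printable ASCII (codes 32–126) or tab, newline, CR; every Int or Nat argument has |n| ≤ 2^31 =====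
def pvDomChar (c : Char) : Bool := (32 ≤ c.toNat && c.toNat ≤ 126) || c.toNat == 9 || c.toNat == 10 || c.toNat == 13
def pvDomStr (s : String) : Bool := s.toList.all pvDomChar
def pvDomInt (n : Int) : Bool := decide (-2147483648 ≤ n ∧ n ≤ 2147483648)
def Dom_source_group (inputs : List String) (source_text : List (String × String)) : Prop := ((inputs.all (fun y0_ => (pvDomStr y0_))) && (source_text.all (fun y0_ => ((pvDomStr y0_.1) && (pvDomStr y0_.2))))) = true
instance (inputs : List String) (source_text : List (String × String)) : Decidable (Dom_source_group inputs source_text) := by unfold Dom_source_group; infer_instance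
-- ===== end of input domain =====

-- B replaces A's single-pass key/groupdict state machine by two staged passes:
-- split the input into maximal consecutive runs, then build the nested dict from the runs.

-- ===== PORT A =====
-- A's loop state: current run key `key`, pending group `gd`, result `kd`;
-- after the loop the pending group is flushed (`kd.insert … gd`).
def srcgA (st : PySem.Dict String String) :
    List String → Char → PySem.Dict String String →
    PySem.Dict String (PySem.Dict String String) → PySem.Dict String (PySem.Dict String String)
  | [], key, gd, kd => kd.insert (String.ofList [key]) gd
  | item :: rest, key, gd, kd =>
      if item.toList.headD ' ' = key then
        srcgA st rest key (gd.insert item (st.getD item "")) kd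
      else
        srcgA st rest (item.toList.headD ' ') (PySem.Dict.empty.insert item (st.getD item ""))
          (kd.insert (String.ofList [key]) gd)

def source_group (inputs : List String) (source_text : List (String × String)) : List (String × List (String × String)) :=
  match inputs with
  | [] => []   -- Python raises IndexError here (checklist[0][0]); excluded by Pre_
  | i0 :: _ =>
      let st := PySem.Dict.ofList source_text
      ((srcgA st inputs (i0.toList.headD ' ') PySem.Dict.empty PySem.Dict.empty).items.map
        (fun p => (p.1, p.2.items)))

-- ===== PORT B =====
-- Stage 1: split into maximal consecutive runs (`runs[-1].append` ported as
-- dropLast ++ [last ++ [item]], `runs.append([item])` as ++ [[item]]).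
def runsB : List String → List (List String) → List (List String)
  | [], runs => runs
  | item :: rest, runs =>
      if runs ≠ [] ∧ ((runs.getLastD []).headD "").toList.headD ' ' = item.toList.headD ' ' then
        runsB rest (runs.dropLast ++ [runs.getLastD [] ++ [item]])
      else
        runsB rest (runs ++ [[item]])

-- Stage 2: the inner dict comprehension for one run.
def innerB (st : PySem.Dict String String) (run : List String) : PySem.Dict String String :=
  run.foldl (fun d item => d.insert item (st.getD item "")) PySem.Dict.empty

-- Stage 2: the outer dict comprehension over the runs.
def outerStepB (st : PySem.Dict String String)
    (kd : PySem.Dict String (PySem.Dict String String)) (run : List String) :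
    PySem.Dict String (PySem.Dict String String) :=
  kd.insert (String.ofList [(run.headD "").toList.headD ' ']) (innerB st run)

def source_group_alt (inputs : List String) (source_text : List (String × String)) : List (String × List (String × String)) :=
  let st := PySem.Dict.ofList source_text
  (((runsB inputs []).foldl (outerStepB st) PySem.Dict.empty).items.map
    (fun p => (p.1, p.2.items)))

-- ===== PRECONDITION & SPEC =====
-- Pre_ excludes exactly the inputs where A raises: empty `inputs` (IndexError on checklist[0][0]),
-- an empty-string item (IndexError on item[0]), an item missing from source_text (KeyError).
def Pre_source_group (inputs : List String) (source_text : List (String × String)) : Prop :=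
  inputs ≠ [] ∧ ∀ s ∈ inputs, s.toList ≠ [] ∧ s ∈ source_text.map Prod.fst
instance (inputs : List String) (source_text : List (String × String)) : Decidable (Pre_source_group inputs source_text) := by unfold Pre_source_group; infer_instance

def pvWitness_source_group : List String × (List (String × String)) :=
  (["ab", "ac", "ba"], [("ab", "1"), ("ac", "2"), ("ba", "3")])

def Spec_source_group (inputs : List String) (source_text : List (String × String)) (out : List (String × List (String × String))) : Prop := out = source_group_alt inputs source_text
instance (inputs : List String) (source_text : List (String × String)) (out : List (String × List (String × String))) : Decidable (Spec_source_group inputs source_text out) := by unfold Spec_source_group; infer_instance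

-- ===== CLAIM (what is proved, stated in full; the proofs are below) =====
def Claim_equal_source_group : Prop := ∀ (inputs : List String) (source_text : List (String × String)), Dom_source_group inputs source_text → Pre_source_group inputs source_text → Spec_source_group inputs source_text (source_group inputs source_text)

-- ===== LEMMAS AND PROOFS =====

-- runsB never touches an already-closed prefix of the runs list.
theorem runsB_prefix (rest : List String) (R1 : List (List String)) :
    ∀ R2 : List (List String), R2 ≠ [] → runsB rest (R1 ++ R2) = R1 ++ runsB rest R2 := by
  induction rest with
  | nil => intro R2 _; simp [runsB]
  | cons item rest ih =>
      intro R2 h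
      rcases List.eq_nil_or_concat' R2 with rfl | ⟨L, b, rfl⟩
      · exact absurd rfl h
      · by_cases hc : (b.headD "").toList.headD ' ' = item.toList.headD ' '
        · simp only [runsB, ← List.append_assoc, List.getLastD_concat, List.dropLast_concat,
            ne_eq, List.append_ne_nil_of_right_ne_nil _ (by simp : ([b] : List (List String)) ≠ []),
            not_false_eq_true, true_and, hc, if_pos]
          rw [List.append_assoc R1 L, ih (L ++ [b ++ [item]]) (by simp)]
        · simp only [runsB, ← List.append_assoc, List.getLastD_concat, ne_eq,
            List.append_ne_nil_of_right_ne_nil _ (by simp : ([b] : List (List String)) ≠ []),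
            not_false_eq_true, true_and, hc, if_neg]
          simpa [List.append_assoc] using ih ((L ++ [b]) ++ [[item]]) (by simp)

theorem inner_append (st : PySem.Dict String String) (run : List String) (item : String) :
    innerB st (run ++ [item]) = (innerB st run).insert item (st.getD item "") := by
  simp [innerB, List.foldl_append]

theorem head_append (run : List String) (item : String) (h : run ≠ []) :
    (run ++ [item]).headD "" = run.headD "" := by
  cases run with
  | nil => exact absurd rfl h
  | cons a l => simp

-- Main invariant: A's recursion, with pending group = the inner dict of the current
-- (nonempty) run and key = that run's first char, equals folding stage 2 over the
-- runs that stage 1 produces from the remaining input.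
theorem srcgA_eq_stages (st : PySem.Dict String String) (rest : List String) :
    ∀ (lastRun : List String) (kd : PySem.Dict String (PySem.Dict String String)),
      lastRun ≠ [] →
      srcgA st rest ((lastRun.headD "").toList.headD ' ') (innerB st lastRun) kd
        = (runsB rest [lastRun]).foldl (outerStepB st) kd := by
  induction rest with
  | nil =>
      intro lastRun kd _
      simp [srcgA, runsB, outerStepB, List.foldl]
  | cons item rest ih =>
      intro lastRun kd h
      by_cases hc : item.toList.headD ' ' = (lastRun.headD "").toList.headD ' '
      · simp only [srcgA, runsB]
        rw [if_pos hc, if_pos ⟨by simp, by simpa using hc.symm⟩]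
        rw [show ([lastRun] : List (List String)).dropLast ++
              [([lastRun] : List (List String)).getLastD [] ++ [item]] = [lastRun ++ [item]] by
            simp]
        rw [← inner_append,
          show ((lastRun.headD "").toList.headD ' ')
              = (((lastRun ++ [item]).headD "").toList.headD ' ') by
            rw [head_append lastRun item h]]
        exact ih (lastRun ++ [item]) kd (by simp)
      · simp only [srcgA, runsB]
        rw [if_neg hc, if_neg (fun hx => hc (by simpa using hx.2.symm))]
        rw [runsB_prefix rest [lastRun] [[item]] (by simp), List.foldl_append]
        simp only [List.foldl_cons, List.foldl_nil]
        have hi : (PySem.Dict.empty.insert item (st.getD item "") : PySem.Dict String String)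
            = innerB st [item] := by simp [innerB]
        have hk : item.toList.headD ' ' = (([item] : List String).headD "").toList.headD ' ' := by
          simp
        rw [hi, hk]
        simpa [outerStepB] using ih [item] (outerStepB st kd lastRun) (by simp)

-- ===== VERDICT (by name: the statement is the Claim_ definition above) =====
theorem source_group_spec : Claim_equal_source_group := by
  intro inputs source_text _ hpre
  unfold Spec_source_group
  match inputs with
  | [] => exact absurd rfl hpre.1
  | i0 :: rest =>
      simp only [source_group, source_group_alt, srcgA, runsB]
      rw [if_pos trivial, if_neg (by simp)]
      have hE : (PySem.Dict.empty.insert i0 ((PySem.Dict.ofList source_text).getD i0 "") :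
          PySem.Dict String String) = innerB (PySem.Dict.ofList source_text) [i0] := by
        simp [innerB]
      have hk : i0.toList.headD ' ' = (([i0] : List String).headD "").toList.headD ' ' := by simp
      rw [hE, hk, srcgA_eq_stages _ rest [i0] _ (by simp)]
      rfl
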